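-- pv_equiv track=rewrite | github.com/Jiseon94/python_algorithm | 프로그래머스/0/181893. 배열 조각하기/배열 조각하기.py | solution
-- ===== SOURCE A (Python) =====
-- def solution(arr, query):
--     # q가 2 이상일때,
--     for i in range(len(query)):
--         n = query[i]
--
--         if (i==0):
--             arr = arr[:n+1]
--         if (i%2!=0):
--             arr = arr[n:]
--         elif (i%2 ==0):
--             arr = arr[:n+1]
--     return arr
-- ===== SOURCE B (Python) =====
-- def solution(arr, query):
--     # Track window bounds (lo, L) over indices; slice the array once at the end (alternative strategy).
--     lo, L = 0, len(arr)
--     for i, n in enumerate(query):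
--         if i == 0:
--             t = n + 1
--             L = max(0, L + t) if t < 0 else min(t, L)
--         if i % 2 != 0:
--             d = max(0, L + n) if n < 0 else min(n, L)
--             lo += d
--             L -= d
--         else:
--             t = n + 1
--             L = max(0, L + t) if t < 0 else min(t, L)
--     return arr[lo:lo+L]
-- ===== Notes on version B (the rewrite author's own statement) =====
-- stated objective: alternative
-- what changed: Instead of materialising a new list slice per query, B maintains integer window bounds (lo, length) across all queries with Python slice-clamping arithmetic and slices the array exactly once at the end.
import Mathlib
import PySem

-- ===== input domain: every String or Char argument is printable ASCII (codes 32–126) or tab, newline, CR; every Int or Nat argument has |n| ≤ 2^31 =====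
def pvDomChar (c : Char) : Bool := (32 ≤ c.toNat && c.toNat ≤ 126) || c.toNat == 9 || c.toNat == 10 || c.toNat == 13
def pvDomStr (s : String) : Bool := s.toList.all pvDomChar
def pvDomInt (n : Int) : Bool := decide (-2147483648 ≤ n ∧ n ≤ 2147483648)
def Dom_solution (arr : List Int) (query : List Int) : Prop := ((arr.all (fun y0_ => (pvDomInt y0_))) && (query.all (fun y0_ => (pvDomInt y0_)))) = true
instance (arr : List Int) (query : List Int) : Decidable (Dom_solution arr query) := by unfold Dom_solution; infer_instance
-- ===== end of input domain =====

-- B replaces A's per-query list slicing by window-bound arithmetic and one final slice (alternative algorithm, same observed cost).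

-- ===== PORT A =====
def pvStepA (a : List Int) (p : Int × Int) : List Int :=
  let i := p.1
  let n := p.2
  let a := if i == 0 then PySem.List.slice a none (some (n + 1)) else a
  if PySem.Int.mod i 2 != 0 then PySem.List.slice a (some n) none
  else PySem.List.slice a none (some (n + 1))

def solution (arr : List Int) (query : List Int) : List Int :=
  (PySem.List.enumerate query 0).foldl pvStepA arr

-- ===== PORT B =====
-- Source B's clamp arithmetic: effective count of a Python slice bound b on a window of length L
def pvClamp (b L : Int) : Int := if b < 0 then max 0 (L + b) else min b L

def pvStepB (st : Int × Int) (p : Int × Int) : Int × Int :=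
  let lo := st.1
  let L := st.2
  let i := p.1
  let n := p.2
  let L := if i == 0 then pvClamp (n + 1) L else L
  if PySem.Int.mod i 2 != 0 then (lo + pvClamp n L, L - pvClamp n L)
  else (lo, pvClamp (n + 1) L)

def solution_alt (arr : List Int) (query : List Int) : List Int :=
  let st := (PySem.List.enumerate query 0).foldl pvStepB (0, (arr.length : Int))
  PySem.List.slice arr (some st.1) (some (st.1 + st.2))

-- ===== PRECONDITION & SPEC =====
def Spec_solution (arr : List Int) (query : List Int) (out : List Int) : Prop := out = solution_alt arr query
instance (arr : List Int) (query : List Int) (out : List Int) : Decidable (Spec_solution arr query out) := by unfold Spec_solution; infer_instance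

-- ===== CLAIM (what is proved, stated in full; the proofs are below) =====
def Claim_equal_solution : Prop := ∀ (arr : List Int) (query : List Int), Dom_solution arr query → Spec_solution arr query (solution arr query)

-- ===== LEMMAS AND PROOFS =====

theorem take_min_len (a : List Int) (m : Nat) : a.take (min m a.length) = a.take m := by
  rcases le_total m a.length with h | h
  · rw [min_eq_left h]
  · rw [min_eq_right h, List.take_length, List.take_of_length_le h]

theorem drop_min_len (a : List Int) (m : Nat) : a.drop (min m a.length) = a.drop m := by
  rcases le_total m a.length with h | h
  · rw [min_eq_left h]
  · rw [min_eq_right h, List.drop_length, List.drop_of_length_le h]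

theorem slice_to_clamp (a : List Int) (b : Int) :
    PySem.List.slice a none (some b) = a.take (pvClamp b (a.length : Int)).toNat := by
  unfold pvClamp
  by_cases hb : 0 ≤ b
  · rw [if_neg (by omega), PySem.List.slice_to a hb]
    have : (min b (a.length : Int)).toNat = min b.toNat a.length := by omega
    rw [this, take_min_len]
  · have hk : 0 < (-b).toNat := by omega
    have hb' : b = -(((-b).toNat : Nat) : Int) := by omega
    rw [if_pos (by omega), hb', PySem.List.slice_to_neg_natCast a (-b).toNat hk]
    congr 1
    omega

theorem slice_from_clamp (a : List Int) (b : Int) :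
    PySem.List.slice a (some b) none = a.drop (pvClamp b (a.length : Int)).toNat := by
  unfold pvClamp
  by_cases hb : 0 ≤ b
  · rw [if_neg (by omega), PySem.List.slice_from a hb]
    have : (min b (a.length : Int)).toNat = min b.toNat a.length := by omega
    rw [this, drop_min_len]
  · have hk : 0 < (-b).toNat := by omega
    have hb' : b = -(((-b).toNat : Nat) : Int) := by omega
    rw [if_pos (by omega), hb', PySem.List.slice_from_neg_natCast a (-b).toNat hk]
    congr 1
    omega

theorem pvClamp_bounds (b L : Int) (hL : 0 ≤ L) : 0 ≤ pvClamp b L ∧ pvClamp b L ≤ L := by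
  unfold pvClamp; split_ifs <;> omega

theorem window_len (xs : List Int) (lo L : Int) (h0 : 0 ≤ lo) (h1 : 0 ≤ L)
    (h2 : lo + L ≤ (xs.length : Int)) :
    (((xs.drop lo.toNat).take L.toNat).length : Int) = L := by
  simp [List.length_take, List.length_drop]
  omega

theorem fold_invariant (ps : List (Int × Int)) (xs : List Int) (lo L : Int)
    (h0 : 0 ≤ lo) (h1 : 0 ≤ L) (h2 : lo + L ≤ (xs.length : Int)) :
    0 ≤ (ps.foldl pvStepB (lo, L)).1 ∧ 0 ≤ (ps.foldl pvStepB (lo, L)).2 ∧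
    (ps.foldl pvStepB (lo, L)).1 + (ps.foldl pvStepB (lo, L)).2 ≤ (xs.length : Int) ∧
    ps.foldl pvStepA ((xs.drop lo.toNat).take L.toNat) =
      (xs.drop (ps.foldl pvStepB (lo, L)).1.toNat).take (ps.foldl pvStepB (lo, L)).2.toNat := by
  induction ps generalizing lo L with
  | nil => exact ⟨h0, h1, h2, rfl⟩
  | cons p ps ih =>
    obtain ⟨i, n⟩ := p
    simp only [List.foldl_cons]
    have hlen : ((((xs.drop lo.toNat).take L.toNat).length : Nat) : Int) = L :=
      window_len xs lo L h0 h1 h2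
    set L1 := (if i == 0 then pvClamp (n + 1) L else L) with hL1
    have hc1 := pvClamp_bounds (n + 1) L h1
    have hL1b : 0 ≤ L1 ∧ L1 ≤ L := by rw [hL1]; split_ifs <;> omega
    have hstepB : pvStepB (lo, L) (i, n) =
        if PySem.Int.mod i 2 != 0 then (lo + pvClamp n L1, L1 - pvClamp n L1)
        else (lo, pvClamp (n + 1) L1) := by
      rw [hL1]; rfl
    have hstep1 : (if i == 0 then
          PySem.List.slice ((xs.drop lo.toNat).take L.toNat) none (some (n + 1))
        else (xs.drop lo.toNat).take L.toNat) = (xs.drop lo.toNat).take L1.toNat := by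
      rw [hL1]
      by_cases hi : i == 0
      · rw [if_pos hi, if_pos hi, slice_to_clamp, hlen, List.take_take]
        congr 1
        omega
      · rw [if_neg hi, if_neg hi]
    have hlen1 : ((((xs.drop lo.toNat).take L1.toNat).length : Nat) : Int) = L1 :=
      window_len xs lo L1 h0 hL1b.1 (by omega)
    have hcn := pvClamp_bounds n L1 hL1b.1
    have hcn1 := pvClamp_bounds (n + 1) L1 hL1b.1
    have hA : pvStepA ((xs.drop lo.toNat).take L.toNat) (i, n) =
        (xs.drop (pvStepB (lo, L) (i, n)).1.toNat).take (pvStepB (lo, L) (i, n)).2.toNat := by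
      rw [hstepB]
      show (if PySem.Int.mod i 2 != 0 then
              PySem.List.slice (if i == 0 then
                  PySem.List.slice ((xs.drop lo.toNat).take L.toNat) none (some (n + 1))
                else (xs.drop lo.toNat).take L.toNat) (some n) none
            else
              PySem.List.slice (if i == 0 then
                  PySem.List.slice ((xs.drop lo.toNat).take L.toNat) none (some (n + 1))
                else (xs.drop lo.toNat).take L.toNat) none (some (n + 1))) = _
      rw [hstep1]
      cases hodd : (PySem.Int.mod i 2 != 0)
      · simp only [Bool.false_eq_true, if_false]
        rw [slice_to_clamp, hlen1, List.take_take]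
        congr 1
        omega
      · simp only [if_true]
        rw [slice_from_clamp, hlen1, List.drop_take, List.drop_drop]
        have e1 : L1.toNat - (pvClamp n L1).toNat = (L1 - pvClamp n L1).toNat := by omega
        have e2 : lo.toNat + (pvClamp n L1).toNat = (lo + pvClamp n L1).toNat := by omega
        rw [e1, e2]
    have hB1 : 0 ≤ (pvStepB (lo, L) (i, n)).1 ∧ 0 ≤ (pvStepB (lo, L) (i, n)).2 ∧
        (pvStepB (lo, L) (i, n)).1 + (pvStepB (lo, L) (i, n)).2 ≤ (xs.length : Int) := by
      rw [hstepB]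
      split_ifs <;> exact ⟨by omega, by omega, by omega⟩
    have hih := ih (pvStepB (lo, L) (i, n)).1 (pvStepB (lo, L) (i, n)).2 hB1.1 hB1.2.1 hB1.2.2
    rw [hA]
    exact hih

-- ===== VERDICT (by name: the statement is the Claim_ definition above) =====
theorem solution_spec : Claim_equal_solution := by
  intro arr query _
  unfold Spec_solution solution solution_alt
  have h := fold_invariant (PySem.List.enumerate query 0) arr 0 (arr.length : Int)
    le_rfl (by positivity) (by omega)
  obtain ⟨h0, h1, h2, heq⟩ := h
  simp only [Int.toNat_zero, List.drop_zero, Int.toNat_natCast, List.take_length] at heq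
  rw [heq]
  show _ = PySem.List.slice arr
      (some ((PySem.List.enumerate query 0).foldl pvStepB (0, (arr.length : Int))).1)
      (some (((PySem.List.enumerate query 0).foldl pvStepB (0, (arr.length : Int))).1 +
             ((PySem.List.enumerate query 0).foldl pvStepB (0, (arr.length : Int))).2))
  rw [PySem.List.slice_toNat arr h0 (by omega)]
  congr 1
  omega
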